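-- pv_equiv track=rewrite | github.com/maadhavsaini/gigglegiggle | chatbot_hosting_files/app.py | _pick_text_model
-- ===== SOURCE A (Python) =====
-- TEXT_MODEL = "llama-3.3-70b-versatile"
--
-- def _pick_text_model(catalog_models):
--     available_ids = {m["id"] for m in catalog_models}
--     if TEXT_MODEL in available_ids:
--         return TEXT_MODEL
--     for m in catalog_models:
--         if m.get("supportsText"):
--             return m["id"]
--     return TEXT_MODEL
-- ===== SOURCE B (Python) =====
-- TEXT_MODEL = "llama-3.3-70b-versatile"
--
-- def _pick_text_model(catalog_models):
--     has_preferred = False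
--     fallback = None
--     for m in catalog_models:
--         mid = m["id"]
--         if mid == TEXT_MODEL:
--             has_preferred = True
--         if fallback is None and m.get("supportsText"):
--             fallback = mid
--     if has_preferred:
--         return TEXT_MODEL
--     if fallback is not None:
--         return fallback
--     return TEXT_MODEL
-- ===== Notes on version B (the rewrite author's own statement) =====
-- stated objective: alternative
-- what changed: Replaces the build-a-set-then-rescan structure (a set comprehension, a membership test, and a second loop with early return) by one fold over the list maintaining two accumulators (has_preferred flag and first text-capable fallback id), deciding the result after the single pass.
import Mathlib
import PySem

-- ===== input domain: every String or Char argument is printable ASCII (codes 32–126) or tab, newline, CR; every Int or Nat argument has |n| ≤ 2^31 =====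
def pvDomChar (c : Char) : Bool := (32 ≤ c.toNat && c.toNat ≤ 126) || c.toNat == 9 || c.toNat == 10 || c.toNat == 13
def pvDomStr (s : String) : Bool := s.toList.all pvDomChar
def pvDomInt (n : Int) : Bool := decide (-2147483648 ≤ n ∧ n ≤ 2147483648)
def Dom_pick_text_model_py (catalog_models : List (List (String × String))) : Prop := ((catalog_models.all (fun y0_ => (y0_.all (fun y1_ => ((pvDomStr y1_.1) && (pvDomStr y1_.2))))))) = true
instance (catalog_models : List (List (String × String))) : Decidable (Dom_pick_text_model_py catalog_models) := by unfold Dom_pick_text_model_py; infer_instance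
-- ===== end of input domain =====

-- B replaces A's build-a-set-then-rescan by a single fold carrying a preferred-seen flag and a
-- first text-capable fallback id (alternative decomposition, same cost; return value only).

-- ===== PORT A =====
def pvTextModel : String := "llama-3.3-70b-versatile"

-- m["id"]; total form via getD, exact under Pre_ (key present)
def pvId (m : List (String × String)) : String :=
  ((PySem.Dict.mk m).get? "id").getD ""

-- truthiness of m.get("supportsText"): present and a non-empty string
def pvSupportsText (m : List (String × String)) : Bool :=
  match (PySem.Dict.mk m).get? "supportsText" with
  | some s => !(s == "")
  | none => false

-- A's second loop: first m with truthy supportsText, else TEXT_MODEL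
def pickLoopA : List (List (String × String)) → String
  | [] => pvTextModel
  | m :: rest => if pvSupportsText m then pvId m else pickLoopA rest

def pick_text_model_py (catalog_models : List (List (String × String))) : String :=
  let available_ids : PySem.Set String := PySem.Set.ofList (catalog_models.map pvId)
  if pvTextModel ∈ available_ids then pvTextModel
  else pickLoopA catalog_models

-- ===== PORT B =====
-- one fold step: update (has_preferred, fallback)
def stepB (st : Bool × Option String) (m : List (String × String)) : Bool × Option String :=
  let mid := pvId m
  let hp := if mid == pvTextModel then true else st.1
  let fb := if st.2.isNone && pvSupportsText m then some mid else st.2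
  (hp, fb)

def pick_text_model_py_alt (catalog_models : List (List (String × String))) : String :=
  let st := catalog_models.foldl stepB (false, none)
  if st.1 then pvTextModel
  else match st.2 with
    | some f => f
    | none => pvTextModel

-- ===== PRECONDITION & SPEC =====
-- Pre_ excludes inputs where some dict lacks the "id" key: there the Python A (and B) raises KeyError.
def Pre_pick_text_model_py (catalog_models : List (List (String × String))) : Prop :=
  ∀ m ∈ catalog_models, (PySem.Dict.mk m).contains "id" = true
instance (catalog_models : List (List (String × String))) : Decidable (Pre_pick_text_model_py catalog_models) := by unfold Pre_pick_text_model_py; infer_instance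

def pvWitness_pick_text_model_py : (List (List (String × String))) :=
  [[("id", "m1"), ("supportsText", "1")], [("id", "m2")]]

def Spec_pick_text_model_py (catalog_models : List (List (String × String))) (out : String) : Prop := out = pick_text_model_py_alt catalog_models
instance (catalog_models : List (List (String × String))) (out : String) : Decidable (Spec_pick_text_model_py catalog_models out) := by unfold Spec_pick_text_model_py; infer_instance

-- ===== CLAIM (what is proved, stated in full; the proofs are below) =====
def Claim_equal_pick_text_model_py : Prop := ∀ (catalog_models : List (List (String × String))), Dom_pick_text_model_py catalog_models → Pre_pick_text_model_py catalog_models → Spec_pick_text_model_py catalog_models (pick_text_model_py catalog_models)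

-- ===== LEMMAS AND PROOFS =====

-- first text-capable id, as an Option
def findFb : List (List (String × String)) → Option String
  | [] => none
  | m :: rest => if pvSupportsText m then some (pvId m) else findFb rest

theorem foldB_spec (cm : List (List (String × String))) :
    ∀ (b : Bool) (fb : Option String),
    cm.foldl stepB (b, fb) =
      (b || cm.any (fun m => pvId m == pvTextModel),
       fb.orElse (fun _ => findFb cm)) := by
  induction cm with
  | nil => intro b fb; cases fb <;> simp [Option.orElse, findFb]
  | cons m rest ih =>
    intro b fb
    simp only [List.foldl_cons, ih, stepB, List.any_cons]
    cases fb <;> by_cases h : pvSupportsText m <;>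
      by_cases h2 : pvId m == pvTextModel <;>
      simp [findFb, h, h2, Option.orElse]

theorem pickLoopA_eq (cm : List (List (String × String))) :
    pickLoopA cm = (findFb cm).getD pvTextModel := by
  induction cm with
  | nil => rfl
  | cons m rest ih =>
    by_cases h : pvSupportsText m <;> simp [pickLoopA, findFb, h, ih]

-- ===== VERDICT (by name: the statement is the Claim_ definition above) =====
theorem pick_text_model_py_spec : Claim_equal_pick_text_model_py := by
  intro cm _ _
  unfold Spec_pick_text_model_py pick_text_model_py pick_text_model_py_alt
  rw [foldB_spec, pickLoopA_eq]
  by_cases h : pvTextModel ∈ cm.map pvId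
  · have hany : cm.any (fun m => pvId m == pvTextModel) = true := by
      rcases List.mem_map.mp h with ⟨m, hm, hid⟩
      exact List.any_eq_true.mpr ⟨m, hm, by simp [hid]⟩
    simp [PySem.Set.mem_ofList, h, hany]
  · have hany : cm.any (fun m => pvId m == pvTextModel) = false := by
      rw [Bool.eq_false_iff]
      intro hc
      rcases List.any_eq_true.mp hc with ⟨m, hm, hid⟩
      exact h (List.mem_map.mpr ⟨m, hm, by simpa using hid⟩)
    simp only [PySem.Set.mem_ofList, h, if_false, hany, Bool.false_or, Option.orElse]
    cases findFb cm <;> simp
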